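-- pv_equiv track=rewrite | github.com/billylarsson/comicreader | bscripts/file_handling.py | separate_files
-- ===== SOURCE A (Python) =====
-- def separate_files(filecontents):
--     bad_files = []
--     good_files = []
--
--     extensionlist = {'png', 'jpg', 'bmp', 'gif', 'jpeg', 'webp'}
--
--     for file in filecontents: # separates files from folders and good from bad extensions
--         parts = file.split('.')
--
--         if parts[-1].lower() not in extensionlist:
--             bad_files.append(file)
--             continue
--         else:
--             good_files.append(file)
--
--     max = 3 # separeates files if less tham max begins with z or if less than max contains the word tag
--     for gatechecker in {'z', 'tag'}:
--         check = 0
--         for times in range(2):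
--             for count in range(len(good_files) -1, -1, -1):
--                 file = good_files[count]
--                 parts = file.split('/')
--
--                 if gatechecker == 'z' and parts[-1][0].lower() == gatechecker \
--                         or gatechecker == 'tag' and parts[-1].lower().find(gatechecker) > -1:
--
--                     if times == 0:
--                         check += 1
--
--                     elif times == 1 and check <= max:
--                         bad_files.append(file)
--                         good_files.pop(count)
--
--     return dict(good_files=good_files, bad_files=bad_files)
-- ===== SOURCE B (Python) =====
-- def separate_files(filecontents):
--     extensions = {'png', 'jpg', 'bmp', 'gif', 'jpeg', 'webp'}
--
--     def ext_ok(f):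
--         return f.split('.')[-1].lower() in extensions
--
--     def matches(checker, f):
--         base = f.split('/')[-1]
--         if checker == 'z':
--             return base[:1].lower() == 'z'
--         return 'tag' in base.lower()
--
--     good_files = [f for f in filecontents if ext_ok(f)]
--     bad_files = [f for f in filecontents if not ext_ok(f)]
--
--     for checker in ('z', 'tag'):
--         found = [f for f in reversed(good_files) if matches(checker, f)]
--         if len(found) <= 3:
--             bad_files += found
--             good_files = [f for f in good_files if not matches(checker, f)]
--
--     return dict(good_files=good_files, bad_files=bad_files)
-- ===== Notes on version B (the rewrite author's own statement) =====
-- stated objective: simpler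
-- what changed: Replaces A's two-pass counter machinery (a times-in-range(2) loop that first counts matches with a counter and then re-scans by descending index, popping one by one) per gatechecker with a single collect pass that builds the list of matches over reversed(good_files) and then moves the whole batch at once (one append of the collected list and one filter); the extension split becomes two comprehensions instead of an append loop. …
import Mathlib
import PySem

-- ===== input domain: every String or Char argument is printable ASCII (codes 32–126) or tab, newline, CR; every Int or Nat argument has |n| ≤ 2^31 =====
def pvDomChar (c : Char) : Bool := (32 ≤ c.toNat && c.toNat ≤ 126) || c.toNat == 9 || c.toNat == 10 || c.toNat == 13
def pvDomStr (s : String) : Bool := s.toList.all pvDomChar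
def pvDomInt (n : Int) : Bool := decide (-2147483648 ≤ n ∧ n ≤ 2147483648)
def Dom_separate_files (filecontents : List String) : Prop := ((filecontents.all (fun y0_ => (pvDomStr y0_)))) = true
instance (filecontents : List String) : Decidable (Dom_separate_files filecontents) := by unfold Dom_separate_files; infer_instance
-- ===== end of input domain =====

-- B is a simpler decomposition of A: one collect pass + batch move per gatechecker instead of
-- A's count-then-pop two-pass times-loop.  A mutates no argument; return values are compared.
-- The Python A iterates the set literal {'z','tag'} in hash-randomized order; both ports fix the
-- order ['z','tag'] and Pre_ excludes the inputs whose result could depend on that order.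

-- shared condition helpers (the identical Python expressions occur in both A and B)
-- parts[-1].lower() in {'png','jpg','bmp','gif','jpeg','webp'}; split('.') is never empty and the
-- separator '.' is nonempty, so the getD defaults are never taken.
def pvExtOK (file : String) : Bool :=
  ["png", "jpg", "bmp", "gif", "jpeg", "webp"].contains
    (PySem.Str.lower (((PySem.Str.split? file ".").getD []).getLast?.getD ""))

-- gatechecker == 'z' and parts[-1][0].lower() == gatechecker
--   or gatechecker == 'tag' and parts[-1].lower().find(gatechecker) > -1
-- split('/') is never empty (getD defaults never taken); the 'none => false' branch of parts[-1][0]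
-- is a totality guard only: it is evaluated on good-extension files, whose basename is nonempty.
def pvCond (gatechecker file : String) : Bool :=
  let base := ((PySem.Str.split? file "/").getD []).getLast?.getD ""
  (gatechecker == "z" &&
    (match PySem.Str.pyGet? base 0 with
     | some c => PySem.Chars.lowerChar c == 'z'
     | none => false))
  || (gatechecker == "tag" && decide (PySem.Str.find (PySem.Str.lower base) "tag" > -1))

-- ===== PORT A =====
-- 'for times in range(2)' with the shared counter 'check': the times == 0 sweep
-- (count matches, descending index order)
def sepACheck (g : String) (good : List String) : Nat → Int → Int
  | 0, check => check
  | k + 1, check =>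
      match PySem.List.pyGet? good (k : Int) with
      | none => check   -- unreachable: k < len(good)
      | some file => sepACheck g good k (if pvCond g file then check + 1 else check)

-- the times == 1 sweep: descending index, append to bad_files and pop when check <= max
def sepAMove (g : String) (check : Int) : Nat → List String → List String → List String × List String
  | 0, good, bad => (good, bad)
  | k + 1, good, bad =>
      match PySem.List.pyGet? good (k : Int) with
      | none => (good, bad)   -- unreachable: k < len(good)
      | some file =>
          if pvCond g file then
            if check ≤ 3 then sepAMove g check k (good.eraseIdx k) (bad ++ [file])
            else sepAMove g check k good bad
          else sepAMove g check k good bad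

def sepAPass (st : List String × List String) (g : String) : List String × List String :=
  let check := sepACheck g st.1 st.1.length 0
  sepAMove g check st.1.length st.1 st.2

def separate_files (filecontents : List String) : List (String × List String) :=
  -- first loop: separate good from bad extensions, appending one file at a time
  let st := filecontents.foldl
    (fun (st : List String × List String) file =>
      if !pvExtOK file then (st.1, st.2 ++ [file]) else (st.1 ++ [file], st.2))
    ([], [])
  -- for gatechecker in {'z', 'tag'}  (port order fixed; Pre_ makes the set order irrelevant)
  let st := ["z", "tag"].foldl sepAPass st
  [("good_files", st.1), ("bad_files", st.2)]

-- ===== PORT B =====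
def separate_files_alt (filecontents : List String) : List (String × List String) :=
  let good := filecontents.filter (fun f => pvExtOK f)
  let bad := filecontents.filter (fun f => !pvExtOK f)
  let st := ["z", "tag"].foldl
    (fun (st : List String × List String) checker =>
      let found := st.1.reverse.filter (fun f => pvCond checker f)
      if found.length ≤ 3 then
        (st.1.filter (fun f => !pvCond checker f), st.2 ++ found)
      else st)
    (good, bad)
  [("good_files", st.1), ("bad_files", st.2)]

-- ===== PRECONDITION & SPEC =====
-- Pre_ excludes inputs whose good-extension files contain both a basename starting with 'z'/'Z' and
-- a basename containing 'tag': there A's result depends on Python's hash-randomized iteration order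
-- over the set literal {'z','tag'} (A still returns a value, but which value is accidental).
def Pre_separate_files (filecontents : List String) : Prop :=
  ¬ (((filecontents.filter (fun f => pvExtOK f)).any (fun f => pvCond "z" f)) = true ∧
     ((filecontents.filter (fun f => pvExtOK f)).any (fun f => pvCond "tag" f)) = true)
instance (filecontents : List String) : Decidable (Pre_separate_files filecontents) := by
  unfold Pre_separate_files; infer_instance

def pvWitness_separate_files : List String := ["a.png", "b.txt"]

def Spec_separate_files (filecontents : List String) (out : List (String × List String)) : Prop := out = separate_files_alt filecontents
instance (filecontents : List String) (out : List (String × List String)) : Decidable (Spec_separate_files filecontents out) := by unfold Spec_separate_files; infer_instance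

-- ===== CLAIM (what is proved, stated in full; the proofs are below) =====
def Claim_equal_separate_files : Prop := ∀ (filecontents : List String), Dom_separate_files filecontents → Pre_separate_files filecontents → Spec_separate_files filecontents (separate_files filecontents)

-- ===== LEMMAS AND PROOFS =====

-- phase 1: A's append loop computes the pair of filters
theorem sepA_phase1 (l : List String) (g b : List String) :
    l.foldl (fun (st : List String × List String) file =>
        if !pvExtOK file then (st.1, st.2 ++ [file]) else (st.1 ++ [file], st.2)) (g, b)
      = (g ++ l.filter (fun f => pvExtOK f), b ++ l.filter (fun f => !pvExtOK f)) := by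
  induction l generalizing g b with
  | nil => simp
  | cons x xs ih =>
      rw [List.foldl_cons]
      by_cases h : pvExtOK x
      · rw [if_neg (by simp [h]), ih]; simp [h]
      · rw [if_pos (by simp [h]), ih]; simp [h]

-- the times == 0 sweep counts the matches among the first k files
theorem sepACheck_eq (g : String) (good : List String) (k : Nat) (hk : k ≤ good.length) (check : Int) :
    sepACheck g good k check = check + ((good.take k).filter (fun f => pvCond g f)).length := by
  induction k generalizing check with
  | zero => simp [sepACheck]
  | succ k ih =>
      have hlt : k < good.length := by omega
      have htake : good.take (k + 1) = good.take k ++ [good[k]] := by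
        rw [List.take_add_one, List.getElem?_eq_getElem hlt]; rfl
      simp only [sepACheck, PySem.List.pyGet?_ofNat good k hlt]
      rw [ih (by omega), htake, List.filter_append]
      by_cases h : pvCond g good[k] <;> simp [h] <;> omega

-- the times == 1 sweep when check <= 3: moves every match among the first k files
theorem sepAMove_le (g : String) (check : Int) (hc : check ≤ 3) (k : Nat) (good bad : List String)
    (hk : k ≤ good.length) :
    sepAMove g check k good bad
      = ((good.take k).filter (fun f => !pvCond g f) ++ good.drop k,
         bad ++ ((good.take k).reverse.filter (fun f => pvCond g f))) := by
  induction k generalizing good bad with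
  | zero => simp [sepAMove]
  | succ k ih =>
      have hlt : k < good.length := by
        omega
      simp only [sepAMove, PySem.List.pyGet?_ofNat good k hlt]
      have htake : good.take (k + 1) = good.take k ++ [good[k]] := by
        rw [List.take_add_one, List.getElem?_eq_getElem hlt]; rfl
      by_cases h : pvCond g good[k]
      · simp only [h, if_true, if_pos hc]
        have he : good.eraseIdx k = good.take k ++ good.drop (k + 1) :=
          List.eraseIdx_eq_take_drop_succ ..
        have hlen : k ≤ (good.eraseIdx k).length := by
          rw [List.length_eraseIdx_of_lt hlt]; omega
        rw [ih (good.eraseIdx k) (bad ++ [good[k]]) hlen]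
        have htk : k ≤ (good.take k).length := by simp; omega
        have h1 : (good.eraseIdx k).take k = good.take k := by
          rw [he, List.take_append_of_le_length htk, List.take_take]; simp
        have h2 : (good.eraseIdx k).drop k = good.drop (k + 1) := by
          rw [he, List.drop_append_of_le_length htk]
          simp
        have hf1 : (good.take (k + 1)).filter (fun f => !pvCond g f)
            = (good.take k).filter (fun f => !pvCond g f) := by
          rw [htake, List.filter_append, List.filter_singleton]; simp [h]
        have hf2 : (good.take (k + 1)).reverse.filter (fun f => pvCond g f)
            = good[k] :: (good.take k).reverse.filter (fun f => pvCond g f) := by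
          rw [htake, List.reverse_append, List.reverse_singleton, List.singleton_append,
            List.filter_cons_of_pos h]
        rw [h1, h2, hf1, hf2]
        simp [List.append_assoc]
      · simp only [h, if_false, Bool.false_eq_true]
        have hdrop : good.drop k = good[k] :: good.drop (k + 1) := by
          rw [List.drop_eq_getElem_cons hlt]
        have hf1 : (good.take (k + 1)).filter (fun f => !pvCond g f)
            = (good.take k).filter (fun f => !pvCond g f) ++ [good[k]] := by
          rw [htake, List.filter_append, List.filter_singleton]; simp [h]
        have hf2 : (good.take (k + 1)).reverse.filter (fun f => pvCond g f)
            = (good.take k).reverse.filter (fun f => pvCond g f) := by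
          rw [htake, List.reverse_append, List.reverse_singleton, List.singleton_append,
            List.filter_cons_of_neg (by simp [h])]
        rw [ih good bad (by omega), hf1, hf2, hdrop]
        simp [List.append_assoc]

-- the times == 1 sweep when check > 3: nothing moves
theorem sepAMove_gt (g : String) (check : Int) (hc : ¬ check ≤ 3) (k : Nat) (good bad : List String)
    (hk : k ≤ good.length) :
    sepAMove g check k good bad = (good, bad) := by
  induction k generalizing bad with
  | zero => simp [sepAMove]
  | succ k ih =>
      have hlt : k < good.length := by omega
      simp only [sepAMove, PySem.List.pyGet?_ofNat good k hlt]
      by_cases h : pvCond g good[k] <;> simp [h, hc] <;> exact ih bad (by omega)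

-- A's whole pass for one gatechecker equals B's collect-then-batch-move pass
theorem sepAPass_eq (g : String) (st : List String × List String) :
    sepAPass st g
      = (if (st.1.reverse.filter (fun f => pvCond g f)).length ≤ 3 then
           (st.1.filter (fun f => !pvCond g f), st.2 ++ st.1.reverse.filter (fun f => pvCond g f))
         else st) := by
  obtain ⟨good, bad⟩ := st
  simp only [sepAPass]
  rw [sepACheck_eq g good good.length le_rfl 0, List.take_length]
  by_cases h3 : (good.filter (fun f => pvCond g f)).length ≤ 3
  · have h3i : (0 : Int) + ((good.filter (fun f => pvCond g f)).length : Int) ≤ 3 := by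
      omega
    rw [sepAMove_le g _ h3i good.length good bad le_rfl]
    simp [List.filter_reverse, h3]
  · have h3i : ¬ (0 : Int) + ((good.filter (fun f => pvCond g f)).length : Int) ≤ 3 := by
      omega
    rw [sepAMove_gt g _ h3i good.length good bad le_rfl]
    simp [List.filter_reverse, h3]

-- ===== VERDICT (by name: the statement is the Claim_ definition above) =====
theorem separate_files_spec : Claim_equal_separate_files := by
  intro fc _ _
  show separate_files fc = separate_files_alt fc
  unfold separate_files separate_files_alt
  rw [sepA_phase1]
  simp only [List.foldl_cons, List.foldl_nil, sepAPass_eq, List.nil_append]
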